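-- pv_equiv track=rewrite | github.com/aleksandra2812/SylLab | syllab3.py | penultimate_stress
-- ===== SOURCE A (Python) =====
-- NEVER_STRESS = {
--     "w", "z", "i", "a", "o", "się", "nie"
-- }
--
-- def penultimate_stress(word, syllables):
--     n = len(syllables)
--     pattern = ["s"] * n
--     word_lower = word.lower()
--
--     if word_lower in NEVER_STRESS:
--         return pattern
--
--     if n == 1:
--         pattern[0] = "S"
--         return pattern
--
--     penultimate = n - 2
--     pattern[penultimate] = "S"
--
--     i = penultimate - 2
--     while i >= 0:
--         pattern[i] = "(S)"
--         i -= 2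
--
--     return pattern
-- ===== SOURCE B (Python) =====
-- NEVER_STRESS = {
--     "w", "z", "i", "a", "o", "się", "nie"
-- }
--
-- def penultimate_stress(word, syllables):
--     if word.lower() in NEVER_STRESS:
--         return ["s"] * len(syllables)
--     n = len(syllables)
--     if n == 1:
--         return ["S"]
--     # closed-form label per position, one forward pass
--     return ["S" if i == n - 2
--             else "(S)" if i < n - 2 and (n - 2 - i) % 2 == 0
--             else "s"
--             for i in range(n)]
-- ===== Notes on version B (the rewrite author's own statement) =====
-- stated objective: simpler
-- what changed: Instead of allocating an all-'s' list, mutating the penultimate slot and stepping backward by two, B builds the pattern in one forward comprehension computing each label from its closed-form relation to the penultimate index.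
import Mathlib
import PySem

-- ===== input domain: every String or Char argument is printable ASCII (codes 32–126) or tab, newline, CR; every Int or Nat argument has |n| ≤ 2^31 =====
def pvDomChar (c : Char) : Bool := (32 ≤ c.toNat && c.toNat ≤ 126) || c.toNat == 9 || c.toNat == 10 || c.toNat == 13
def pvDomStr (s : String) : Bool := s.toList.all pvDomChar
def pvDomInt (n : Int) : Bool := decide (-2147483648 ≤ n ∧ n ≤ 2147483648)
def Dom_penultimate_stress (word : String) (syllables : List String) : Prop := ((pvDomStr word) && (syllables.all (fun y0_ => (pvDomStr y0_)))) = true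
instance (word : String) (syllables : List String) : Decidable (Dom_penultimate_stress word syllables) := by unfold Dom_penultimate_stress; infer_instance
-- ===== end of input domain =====

-- B replaces A's mutate-backward-by-two filling with a single forward pass computing each
-- label in closed form from the penultimate index (objective: simpler).


-- ===== PORT A =====
-- NEVER_STRESS (module constant, shared by both Pythons)
def neverStress : List String := ["w", "z", "i", "a", "o", "się", "nie"]

-- the 'while i >= 0: pattern[i] = "(S)"; i -= 2' loop; 0 ≤ i < len holds at every
-- iteration A reaches, where pySetD is exactly Python's item-assignment
def pyLoopA (pattern : List String) (i : Int) : List String :=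
  if _h : i ≥ 0 then pyLoopA (PySem.List.pySetD pattern i "(S)") (i - 2) else pattern
termination_by (i + 2).toNat
decreasing_by omega

def penultimate_stress (word : String) (syllables : List String) : List String :=
  let n : Int := PySem.List.len syllables
  let pattern : List String := List.replicate n.toNat "s"       -- ["s"] * n
  let word_lower := PySem.Str.lower word
  if word_lower ∈ neverStress then pattern
  else if n = 1 then pattern.set 0 "S"                          -- pattern[0] = "S" (0 in range)
  else
    let penultimate := n - 2
    match PySem.List.pySet? pattern penultimate "S" with        -- pattern[penultimate] = "S"
    | none => []                                                -- Python: IndexError (n = 0); excluded by Pre_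
    | some pattern => pyLoopA pattern (penultimate - 2)

-- ===== PORT B =====
def penultimate_stress_alt (word : String) (syllables : List String) : List String :=
  if PySem.Str.lower word ∈ neverStress then List.replicate syllables.length "s"
  else
    let n : Int := PySem.List.len syllables
    if n = 1 then ["S"]
    else (PySem.List.pyRange 0 n 1).map (fun i =>
      if i = n - 2 then "S"
      else if i < n - 2 ∧ PySem.Int.mod (n - 2 - i) 2 = 0 then "(S)"
      else "s")

-- ===== PRECONDITION & SPEC =====
-- Pre_ excludes only the inputs where A raises IndexError: empty syllables with a
-- word whose lowercase is not in NEVER_STRESS.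
def Pre_penultimate_stress (word : String) (syllables : List String) : Prop :=
  PySem.Str.lower word ∈ neverStress ∨ syllables ≠ []
instance (word : String) (syllables : List String) : Decidable (Pre_penultimate_stress word syllables) := by unfold Pre_penultimate_stress; infer_instance
def pvWitness_penultimate_stress : String × List String := ("domek", ["do", "mek"])

def Spec_penultimate_stress (word : String) (syllables : List String) (out : List String) : Prop := out = penultimate_stress_alt word syllables
instance (word : String) (syllables : List String) (out : List String) : Decidable (Spec_penultimate_stress word syllables out) := by unfold Spec_penultimate_stress; infer_instance

-- ===== CLAIM (what is proved, stated in full; the proofs are below) =====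
def Claim_equal_penultimate_stress : Prop := ∀ (word : String) (syllables : List String), Dom_penultimate_stress word syllables → Pre_penultimate_stress word syllables → Spec_penultimate_stress word syllables (penultimate_stress word syllables)

-- ===== LEMMAS AND PROOFS =====

-- what the backward loop leaves at each index, in closed form
theorem pyLoopA_getElem? (p : List String) (i : Int) (j : Nat) :
    (pyLoopA p i)[j]? =
      if (j : Int) ≤ i ∧ (i - (j : Int)) % 2 = 0
      then p[j]?.map (fun _ => "(S)") else p[j]? := by
  induction p, i using pyLoopA.induct with
  | case1 p i h ih =>
    rw [pyLoopA, dif_pos h, ih, PySem.List.pySetD_of_nonneg p "(S)" h, List.getElem?_set]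
    by_cases hji : i.toNat = j
    · have hj : (j : Int) = i := by omega
      by_cases hlen : j < p.length
      · have hg : p[j]? = some p[j] := List.getElem?_eq_getElem hlen
        simp only [if_pos hji, if_pos (hji ▸ hlen), hg]
        split_ifs with h1 h2 <;> first | rfl | (exfalso; omega)
      · have hg : p[j]? = none := List.getElem?_eq_none (by omega)
        simp only [if_pos hji, if_neg (hji ▸ hlen), hg]
        split_ifs <;> rfl
    · simp only [if_neg hji]
      split_ifs with h1 h2 <;> first | rfl | omega
  | case2 p i h =>
    rw [pyLoopA, dif_neg h, if_neg]
    omega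


theorem penultimate_stress_spec : Claim_equal_penultimate_stress := by
  intro word syllables _ hpre
  unfold Spec_penultimate_stress
  unfold penultimate_stress penultimate_stress_alt
  simp only [PySem.List.len_eq, Int.toNat_natCast]
  by_cases hm : PySem.Str.lower word ∈ neverStress
  · simp [hm]
  · simp only [if_neg hm]
    have hne : syllables ≠ [] := hpre.resolve_left hm
    have hL1 : 1 ≤ syllables.length := List.length_pos_iff.mpr hne
    by_cases h1 : (syllables.length : Int) = 1
    · have : syllables.length = 1 := by omega
      simp [this]
    · simp only [if_neg h1]
      have hL : 2 ≤ syllables.length := by omega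
      have hcast : (syllables.length : Int) - 2 = ((syllables.length - 2 : Nat) : Int) := by omega
      have hset : PySem.List.pySet? (List.replicate syllables.length "s") ((syllables.length : Int) - 2) "S"
          = some ((List.replicate syllables.length "s").set (syllables.length - 2) "S") := by
        rw [hcast]
        exact PySem.List.pySet?_natCast _ _ _ (by simp; omega)
      rw [hset]
      apply List.ext_getElem?
      intro j
      rw [pyLoopA_getElem?]
      by_cases hj : j < syllables.length
      · rw [PySem.List.getElem?_map_pyRange_zero _ _ _ hj]
        rw [List.getElem?_set]
        simp only [List.getElem?_replicate, if_pos hj]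
        simp only [PySem.Int.mod_eq_emod_of_pos (show (0:Int) < 2 by omega), List.length_replicate]
        by_cases he : j = syllables.length - 2
        · have h2 : (j : Int) = (syllables.length : Int) - 2 := by omega
          rw [if_pos h2, if_neg (by omega : ¬((j:Int) ≤ (syllables.length:Int) - 2 - 2 ∧ ((syllables.length:Int) - 2 - 2 - (j:Int)) % 2 = 0)), if_pos he.symm, if_pos (by omega : syllables.length - 2 < syllables.length)]
        · have h2 : (j : Int) ≠ (syllables.length : Int) - 2 := by omega
          rw [if_neg h2, if_neg (by omega : ¬(syllables.length - 2 = j))]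
          split_ifs with ha hb hc <;> first | rfl | (exfalso; omega)
      · have h1 : ((List.replicate syllables.length "s").set (syllables.length - 2) "S")[j]? = none := by
          simp; omega
        simp only [h1, Option.map_none]
        split_ifs <;>
          (symm; apply List.getElem?_eq_none; simp [PySem.List.length_pyRange_one]; omega)
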